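-- pv_equiv track=rewrite | github.com/ioaksenenko/neural_networks | release/datamaker/main.py | matching_question_generate
-- ===== SOURCE A (Python) =====
-- import itertools
--
-- def matching_question_generate(n=1):
--     inputs = []
--     outputs = []
--     iterable = [chr(i) for i in range(ord('а'), ord('я') + 1, 1)]
--     permutations = itertools.permutations(iterable[:n], n)
--     for permutation in permutations:
--         input = '<p>_</p>'
--         output = [[0], [0], [0], [1], [0], [0], [0], [0]]
--         for j in range(len(permutation)):
--             input += '<p>' + str(j + 1) + ')_</p>'
--             output += [[0], [0], [0]]
--             for _ in str(j + 1):
--                 output += [[3]]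
--             output += [[3], [3], [0], [0], [0], [0]]
--         for j in range(len(permutation)):
--             input += '<p>' + iterable[j] + ')_</p>'
--             output += [[0], [0], [0], [0], [0], [0], [0], [0], [0], [0]]
--         input += '<p>Ответ:'
--         output += [[0], [0], [0], [0], [0], [0], [0], [0], [0]]
--         for j in range(len(permutation)):
--             fragment = str(j + 1) + '-' + permutation[j] + (',' if j < len(permutation) - 1 else '')
--             input += fragment
--             for _ in fragment:
--                 output += [[2, j + 4]]
--         input += '</p>'
--         output += [[0], [0], [0], [0]]
--         inputs.append(input)
--         outputs.append(output)
--     return inputs, outputs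
-- ===== SOURCE B (Python) =====
-- def _perms(xs, r):
--     # all length-r permutations of xs, in the order of lexicographic index selection
--     if not 0 <= r <= len(xs):
--         return []
--     if r == 0:
--         return [[]]
--     return [[x] + p
--             for i, x in enumerate(xs)
--             for p in _perms(xs[:i] + xs[i + 1:], r - 1)]
--
--
-- def _render_input(letters, p):
--     return ('<p>_</p>'
--             + ''.join('<p>' + str(j + 1) + ')_</p>' for j in range(len(p)))
--             + ''.join('<p>' + letters[j] + ')_</p>' for j in range(len(p)))
--             + '<p>Ответ:'
--             + ','.join(str(j + 1) + '-' + c for j, c in enumerate(p))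
--             + '</p>')
--
--
-- def _render_output(p):
--     return ([[0], [0], [0], [1], [0], [0], [0], [0]]
--             + [lab for j in range(len(p))
--                for lab in [[0]] * 3 + [[3]] * (len(str(j + 1)) + 2) + [[0]] * 4]
--             + [[0]] * (10 * len(p))
--             + [[0]] * 9
--             + [lab for j, c in enumerate(p)
--                for lab in [[2, j + 4]] * (len(str(j + 1)) + 1 + len(c)
--                                           + (1 if j < len(p) - 1 else 0))]
--             + [[0]] * 4)
--
--
-- def matching_question_generate(n=1):
--     letters = [chr(i) for i in range(ord('а'), ord('я') + 1)]
--     ps = _perms(letters[:n], n)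
--     return ([_render_input(letters, p) for p in ps],
--             [_render_output(p) for p in ps])
-- ===== Notes on version B (the rewrite author's own statement) =====
-- stated objective: alternative
-- what changed: B replaces itertools.permutations with its own recursive index-selection permutation generator and builds each question declaratively — the input string as a join of comprehension-generated fragments with ','.join for the answer list, the label list from counted block replications — instead of A's single loop mutating a string and list character by character.
import Mathlib
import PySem

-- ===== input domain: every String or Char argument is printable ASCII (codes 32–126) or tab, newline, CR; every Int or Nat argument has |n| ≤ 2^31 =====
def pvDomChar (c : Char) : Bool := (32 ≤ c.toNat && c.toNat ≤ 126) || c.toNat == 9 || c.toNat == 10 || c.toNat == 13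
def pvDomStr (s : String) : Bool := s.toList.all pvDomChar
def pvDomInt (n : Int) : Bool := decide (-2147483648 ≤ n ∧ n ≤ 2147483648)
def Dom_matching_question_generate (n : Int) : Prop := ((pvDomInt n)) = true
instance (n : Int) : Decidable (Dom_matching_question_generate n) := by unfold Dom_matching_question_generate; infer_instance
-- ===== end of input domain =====

-- B generates the permutations with its own recursive index-selection helper and renders each
-- question by joining whole comprehension-built fragments (',='-join for the answer list, label
-- blocks as counted replications) instead of A's character-by-character accumulating loops;
-- objective: alternative (same asymptotic cost, different decomposition).

-- ===== PORT A =====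
-- itertools.permutations(xs, r): PySem.List.permutations plus itertools' documented r > len(xs)
-- short-circuit (itertools emits nothing at once; without it evaluation would recurse 32!-fold)
def pvPermutations {a : Type} (xs : List a) (r : Nat) : List (List a) :=
  if xs.length < r then [] else PySem.List.permutations xs r

-- [chr(i) for i in range(ord('а'), ord('я') + 1, 1)]  (shared by both Pythons, literally this line)
def pvIter : List String :=
  (PySem.List.pyRange 1072 1104 1).map (fun i => String.ofList [Char.ofNat i.toNat])

-- the body of A's `for permutation in permutations:` loop, step for step
def pvBuildA (iterable : List String) (p : List String) : String × List (List Int) :=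
  let st : String × List (List Int) := ("<p>_</p>", [[0],[0],[0],[1],[0],[0],[0],[0]])
  let st := (PySem.List.pyRange 0 (p.length : Int) 1).foldl (fun (st : String × List (List Int)) j =>
      (st.1 ++ "<p>" ++ PySem.Int.toStr (j+1) ++ ")_</p>",
       ((PySem.Int.toStr (j+1)).toList.foldl (fun o _ => o ++ [[3]]) (st.2 ++ [[0],[0],[0]]))
         ++ [[3],[3],[0],[0],[0],[0]])) st
  let st := (PySem.List.pyRange 0 (p.length : Int) 1).foldl (fun (st : String × List (List Int)) j =>
      (st.1 ++ "<p>" ++ PySem.List.pyGetD iterable j "" ++ ")_</p>",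
       st.2 ++ [[0],[0],[0],[0],[0],[0],[0],[0],[0],[0]])) st
  let st := (st.1 ++ "<p>Ответ:", st.2 ++ [[0],[0],[0],[0],[0],[0],[0],[0],[0]])
  let st := (PySem.List.pyRange 0 (p.length : Int) 1).foldl (fun (st : String × List (List Int)) j =>
      let fragment := PySem.Int.toStr (j+1) ++ "-" ++ PySem.List.pyGetD p j ""
        ++ (if j < (p.length : Int) - 1 then "," else "")
      (st.1 ++ fragment,
       fragment.toList.foldl (fun o _ => o ++ [[2, j+4]]) st.2)) st
  (st.1 ++ "</p>", st.2 ++ [[0],[0],[0],[0]])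

def matching_question_generate (n : Int) : List String × List (List (List Int)) :=
  let iterable := pvIter
  -- itertools.permutations(iterable[:n], n); n.toNat is exact under Pre_ (negative n raises in Python, outside Pre_)
  let perms := pvPermutations (PySem.List.slice iterable none (some n)) n.toNat
  perms.foldl (fun acc p =>
    let io := pvBuildA iterable p
    (acc.1 ++ [io.1], acc.2 ++ [io.2])) ([], [])

-- ===== PORT B =====
-- Source B's _perms: recursive index selection, a guard per call (r stays an int, as in Python)
def pvPermsB (xs : List String) (r : Int) : List (List String) :=
  if ¬ (0 ≤ r ∧ r ≤ (xs.length : Int)) then []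
  else if r = 0 then [[]]
  else (PySem.List.enumerate xs).flatMap (fun ix =>
    (pvPermsB (PySem.List.slice xs none (some ix.1) ++ PySem.List.slice xs (some (ix.1 + 1)) none)
        (r - 1)).map (fun p => ix.2 :: p))
termination_by r.toNat
decreasing_by
  rename_i h1 h2
  rw [not_not] at h1
  omega

-- Source B's _render_input: the five joined pieces
def pvInputB (letters : List String) (p : List String) : String :=
  "<p>_</p>"
  ++ PySem.Str.join "" ((PySem.List.pyRange 0 (PySem.List.len p) 1).map
       (fun j => "<p>" ++ PySem.Int.toStr (j+1) ++ ")_</p>"))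
  ++ PySem.Str.join "" ((PySem.List.pyRange 0 (PySem.List.len p) 1).map
       (fun j => "<p>" ++ PySem.List.pyGetD letters j "" ++ ")_</p>"))
  ++ "<p>Ответ:"
  ++ PySem.Str.join "," ((PySem.List.enumerate p).map
       (fun jc => PySem.Int.toStr (jc.1+1) ++ "-" ++ jc.2))
  ++ "</p>"

-- Source B's _render_output: counted label blocks
def pvOutputB (p : List String) : List (List Int) :=
  [[0],[0],[0],[1],[0],[0],[0],[0]]
  ++ (PySem.List.pyRange 0 (PySem.List.len p) 1).flatMap (fun j =>
       List.replicate 3 ([0] : List Int)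
       ++ List.replicate ((PySem.Str.len (PySem.Int.toStr (j+1))).toNat + 2) ([3] : List Int)
       ++ List.replicate 4 ([0] : List Int))
  ++ List.replicate (10 * p.length) ([0] : List Int)
  ++ List.replicate 9 ([0] : List Int)
  ++ (PySem.List.enumerate p).flatMap (fun jc =>
       List.replicate ((PySem.Str.len (PySem.Int.toStr (jc.1+1))).toNat + 1
           + (PySem.Str.len jc.2).toNat
           + (if jc.1 < PySem.List.len p - 1 then 1 else 0)) ([2, jc.1+4] : List Int))
  ++ List.replicate 4 ([0] : List Int)

def matching_question_generate_alt (n : Int) : List String × List (List (List Int)) :=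
  let letters := pvIter
  let ps := pvPermsB (PySem.List.slice letters none (some n)) n
  (ps.map (fun p => pvInputB letters p), ps.map (fun p => pvOutputB p))

-- ===== PRECONDITION & SPEC =====
-- Pre_ excludes negative n, on which Python A raises ValueError (itertools.permutations with a negative r).
def Pre_matching_question_generate (n : Int) : Prop := 0 ≤ n
instance (n : Int) : Decidable (Pre_matching_question_generate n) := by unfold Pre_matching_question_generate; infer_instance
def pvWitness_matching_question_generate : Int := (2)

def Spec_matching_question_generate (n : Int) (out : List String × List (List (List Int))) : Prop := out = matching_question_generate_alt n
instance (n : Int) (out : List String × List (List (List Int))) : Decidable (Spec_matching_question_generate n out) := by unfold Spec_matching_question_generate; infer_instance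

-- ===== CLAIM (what is proved, stated in full; the proofs are below) =====
def Claim_equal_matching_question_generate : Prop := ∀ (n : Int), Dom_matching_question_generate n → Pre_matching_question_generate n → Spec_matching_question_generate n (matching_question_generate n)
-- ===== LEMMAS AND PROOFS =====

-- B's recursive _perms agrees with A's guarded itertools.permutations
lemma permsB_eq (r : Nat) : ∀ (xs : List String),
    pvPermsB xs (r : Int) = pvPermutations xs r := by
  induction r with
  | zero =>
    intro xs
    rw [pvPermsB.eq_def, pvPermutations]
    have h1 : ¬¬((0:Int) ≤ ((0:Nat) : Int) ∧ ((0:Nat) : Int) ≤ (xs.length : Int)) := by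
      omega
    rw [if_neg h1, if_pos (by norm_num), if_neg (by omega : ¬ xs.length < 0)]
    rw [PySem.List.permutations]
  | succ r ih =>
    intro xs
    rw [pvPermsB.eq_def, pvPermutations]
    by_cases hle : r + 1 ≤ xs.length
    · have h1 : ¬¬((0:Int) ≤ ((r+1:Nat) : Int) ∧ ((r+1:Nat) : Int) ≤ (xs.length : Int)) := by
        omega
      rw [if_neg h1, if_neg (by omega : ¬ ((r+1:Nat) : Int) = 0),
        if_neg (by omega : ¬ xs.length < r + 1)]
      rw [PySem.List.enumerate_eq_map_pyRange xs "", PySem.List.len_eq,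
        PySem.List.pyRange_zero_natCast, List.flatMap_map, List.flatMap_map,
        PySem.List.permutations]
      refine List.flatMap_congr (fun k hk => ?_)
      rw [List.mem_range] at hk
      have hcast : ((r+1:Nat) : Int) - 1 = ((r : Nat) : Int) := by push_cast; ring
      have hget : PySem.List.pyGetD xs ((k:Nat) : Int) "" = xs[k] := by
        rw [PySem.List.pyGetD_natCast, List.getD_eq_getElem _ _ hk]
      have hslice : PySem.List.slice xs none (some ((k:Nat) : Int))
          ++ PySem.List.slice xs (some (((k:Nat) : Int) + 1)) none = xs.eraseIdx k := by
        rw [PySem.List.slice_to_natCast,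
          show (((k:Nat) : Int) + 1) = (((k+1:Nat)) : Int) from by push_cast; ring,
          PySem.List.slice_from_natCast, List.eraseIdx_eq_take_drop_succ]
      simp only [hcast, hget, hslice, List.getElem?_eq_getElem hk]
      rw [ih]
      rw [pvPermutations, if_neg (by rw [List.length_eraseIdx_of_lt hk]; omega)]
    · have h1 : ¬((0:Int) ≤ ((r+1:Nat) : Int) ∧ ((r+1:Nat) : Int) ≤ (xs.length : Int)) := by
        omega
      rw [if_pos h1, if_pos (by omega : xs.length < r + 1)]

-- appending a constant once per character = appending replicate length
lemma foldl_append_const {α β : Type} (c : β) (l : List α) (init : List β) :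
    l.foldl (fun o _ => o ++ [c]) init = init ++ List.replicate l.length c := by
  have h := PySem.List.foldl_append_singleton_eq_map (fun _ : α => c) l init
  rw [h, List.map_const']

-- string-append loop = "" -join of the mapped fragments
lemma strJoin_empty_cons (a : String) (rest : List String) :
    PySem.Str.join "" (a :: rest) = a ++ PySem.Str.join "" rest := by
  cases rest with
  | nil =>
    simp [PySem.Str.join, PySem.Chars.join_singleton, PySem.Chars.join_nil,
      String.ofList_toList]
  | cons b t =>
    simp [PySem.Str.join, PySem.Chars.join_cons_cons, String.ofList_append,
      String.ofList_toList]

lemma foldl_strAppend {α : Type} (f : α → String) : ∀ (l : List α) (s0 : String),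
    l.foldl (fun s x => s ++ f x) s0 = s0 ++ PySem.Str.join "" (l.map f) := by
  intro l
  induction l with
  | nil => intro s0; simp [PySem.Str.join, PySem.Chars.join_nil]
  | cons a t ih =>
    intro s0
    simp only [List.foldl_cons, List.map_cons, strJoin_empty_cons, ih,
      String.append_assoc]

-- per-fragment trailing comma (all but the last) = ","-join
lemma join_comma (F : Int × String → String) : ∀ (p : List String) (s m : Int),
    s + p.length = m →
    PySem.Str.join "" ((PySem.List.enumerate p s).map (fun jc => F jc ++ (if jc.1 < m - 1 then "," else "")))
      = PySem.Str.join "," ((PySem.List.enumerate p s).map F) := by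
  intro p
  induction p with
  | nil => intro s m _; simp [PySem.List.enumerate, PySem.Str.join, PySem.Chars.join_nil]
  | cons x xs ih =>
    intro s m hm
    rw [PySem.List.enumerate_cons]
    cases xs with
    | nil =>
      have hge : ¬ (s < m - 1) := by simp at hm; omega
      simp [PySem.List.enumerate, PySem.Str.join, PySem.Chars.join_singleton,
        hge, String.ofList_toList, String.append_empty]
    | cons y ys =>
      have hlt : s < m - 1 := by simp at hm; omega
      rw [List.map_cons, List.map_cons, strJoin_empty_cons,
        ih (s+1) m (by simp at hm ⊢; omega)]
      have hne : PySem.List.enumerate (y :: ys) (s + 1) = (s + 1, y) :: PySem.List.enumerate ys (s + 1 + 1) :=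
        PySem.List.enumerate_cons _ _ _
      have hjoin : ∀ (r : List String), PySem.Str.join "," (F (s, x) :: F (s+1, y) :: r)
          = F (s, x) ++ "," ++ PySem.Str.join "," (F (s+1, y) :: r) := by
        intro r
        simp only [PySem.Str.join, List.map_cons, PySem.Chars.join_cons_cons]
        rw [String.ofList_append, String.ofList_append, String.ofList_toList,
          String.ofList_toList]
      rw [hne, List.map_cons, hjoin]
      simp [hlt, String.append_assoc]

-- a constant block per loop iteration = one replicate
lemma flatMap_const_replicate {α β : Type} (k : Nat) (x : β) : ∀ (l : List α),
    l.flatMap (fun _ => List.replicate k x) = List.replicate (k * l.length) x := by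
  intro l
  induction l with
  | nil => simp
  | cons a t ih =>
    rw [List.flatMap_cons, ih, List.replicate_append_replicate,
      List.length_cons, Nat.mul_succ, Nat.add_comm]

-- the per-permutation bodies agree
lemma build_eq (p : List String) :
    pvBuildA pvIter p = (pvInputB pvIter p, pvOutputB p) := by
  unfold pvBuildA
  dsimp only
  rw [PySem.List.foldl_prod_mk
    (f := fun s (j : Int) => s ++ "<p>" ++ PySem.Int.toStr (j+1) ++ ")_</p>")
    (g := fun o (j : Int) => ((PySem.Int.toStr (j+1)).toList.foldl (fun o _ => o ++ [[3]]) (o ++ [[0],[0],[0]]))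
         ++ [[3],[3],[0],[0],[0],[0]])]
  rw [PySem.List.foldl_prod_mk
    (f := fun s (j : Int) => s ++ "<p>" ++ PySem.List.pyGetD pvIter j "" ++ ")_</p>")
    (g := fun o (j : Int) => o ++ [[0],[0],[0],[0],[0],[0],[0],[0],[0],[0]])]
  rw [PySem.List.foldl_prod_mk
    (f := fun s (j : Int) => s ++ (PySem.Int.toStr (j+1) ++ "-" ++ PySem.List.pyGetD p j ""
        ++ (if j < (p.length : Int) - 1 then "," else "")))
    (g := fun o (j : Int) => (PySem.Int.toStr (j+1) ++ "-" ++ PySem.List.pyGetD p j ""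
        ++ (if j < (p.length : Int) - 1 then "," else "")).toList.foldl (fun o _ => o ++ [[2, j+4]]) o)]
  simp only [Prod.mk.injEq]
  constructor
  · -- string component
    have hf1 : (fun (s : String) (j : Int) => s ++ "<p>" ++ PySem.Int.toStr (j+1) ++ ")_</p>")
        = (fun (s : String) (j : Int) => s ++ ("<p>" ++ PySem.Int.toStr (j+1) ++ ")_</p>")) := by
      funext s j; simp [String.append_assoc]
    have hf2 : (fun (s : String) (j : Int) => s ++ "<p>" ++ PySem.List.pyGetD pvIter j "" ++ ")_</p>")
        = (fun (s : String) (j : Int) => s ++ ("<p>" ++ PySem.List.pyGetD pvIter j "" ++ ")_</p>")) := by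
      funext s j; simp [String.append_assoc]
    rw [hf1, hf2, foldl_strAppend, foldl_strAppend, foldl_strAppend]
    have hmap : (PySem.List.pyRange 0 (p.length : Int) 1).map
          (fun j => PySem.Int.toStr (j+1) ++ "-" ++ PySem.List.pyGetD p j ""
            ++ (if j < (p.length : Int) - 1 then "," else ""))
        = (PySem.List.enumerate p).map
          (fun jc => (PySem.Int.toStr (jc.1+1) ++ "-" ++ jc.2)
            ++ (if jc.1 < (p.length : Int) - 1 then "," else "")) := by
      rw [PySem.List.enumerate_eq_map_pyRange p "", List.map_map]
      simp [Function.comp, String.append_assoc]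
    rw [hmap, join_comma (fun jc => PySem.Int.toStr (jc.1+1) ++ "-" ++ jc.2) p 0 (p.length : Int) (by simp)]
    simp [pvInputB, String.append_assoc]
  · -- label-list component
    have hg1 : (fun (o : List (List Int)) (j : Int) =>
          ((PySem.Int.toStr (j+1)).toList.foldl (fun o _ => o ++ [[3]]) (o ++ [[0],[0],[0]]))
            ++ [[3],[3],[0],[0],[0],[0]])
        = (fun (o : List (List Int)) (j : Int) =>
          o ++ ([[0],[0],[0]] ++ List.replicate (PySem.Int.toStr (j+1)).toList.length [3]
            ++ [[3],[3],[0],[0],[0],[0]])) := by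
      funext o j; rw [foldl_append_const]; simp [List.append_assoc]
    have hg3 : (fun (o : List (List Int)) (j : Int) =>
          (PySem.Int.toStr (j+1) ++ "-" ++ PySem.List.pyGetD p j ""
            ++ (if j < (p.length : Int) - 1 then "," else "")).toList.foldl (fun o _ => o ++ [[2, j+4]]) o)
        = (fun (o : List (List Int)) (j : Int) =>
          o ++ List.replicate (PySem.Int.toStr (j+1) ++ "-" ++ PySem.List.pyGetD p j ""
            ++ (if j < (p.length : Int) - 1 then "," else "")).toList.length [2, j+4]) := by
      funext o j; rw [foldl_append_const]
    rw [hg1, hg3, PySem.List.foldl_append_eq_flatMap, PySem.List.foldl_append_eq_flatMap,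
      PySem.List.foldl_append_eq_flatMap]
    have e10 : (fun (_ : Int) => ([[0],[0],[0],[0],[0],[0],[0],[0],[0],[0]] : List (List Int)))
        = (fun (_ : Int) => List.replicate 10 ([0] : List Int)) := rfl
    rw [e10, flatMap_const_replicate 10 ([0] : List Int),
      PySem.List.length_pyRange_one]
    have hR : ((p.length : Int) - 0).toNat = p.length := by omega
    rw [hR]
    have hchunk1 : (PySem.List.pyRange 0 (p.length : Int) 1).flatMap
          (fun j => ([[0],[0],[0]] ++ List.replicate (PySem.Int.toStr (j+1)).toList.length [3]
            ++ [[3],[3],[0],[0],[0],[0]] : List (List Int)))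
        = (PySem.List.pyRange 0 (PySem.List.len p) 1).flatMap (fun j =>
            List.replicate 3 ([0] : List Int)
            ++ List.replicate ((PySem.Str.len (PySem.Int.toStr (j+1))).toNat + 2) ([3] : List Int)
            ++ List.replicate 4 ([0] : List Int)) := by
      simp only [PySem.List.len_eq]
      refine List.flatMap_congr (fun j _ => ?_)
      rw [List.replicate_add, PySem.Str.len_eq]
      simp [List.append_assoc, List.replicate]
    have hchunk3 : (PySem.List.pyRange 0 (p.length : Int) 1).flatMap
          (fun j => List.replicate (PySem.Int.toStr (j+1) ++ "-" ++ PySem.List.pyGetD p j ""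
            ++ (if j < (p.length : Int) - 1 then "," else "")).toList.length ([2, j+4] : List Int))
        = (PySem.List.enumerate p).flatMap (fun jc =>
            List.replicate ((PySem.Str.len (PySem.Int.toStr (jc.1+1))).toNat + 1
              + (PySem.Str.len jc.2).toNat
              + (if jc.1 < PySem.List.len p - 1 then 1 else 0)) ([2, jc.1+4] : List Int)) := by
      rw [PySem.List.enumerate_eq_map_pyRange p "", List.flatMap_map]
      simp only [PySem.List.len_eq]
      refine List.flatMap_congr (fun j _ => ?_)
      congr 1
      simp only [PySem.Str.len_eq]
      split_ifs <;> simp [String.toList_append] <;> omega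
    rw [hchunk1, hchunk3]
    simp [pvOutputB, List.append_assoc]

-- ===== VERDICT (by name: the statement is the Claim_ definition above) =====
theorem matching_question_generate_spec : Claim_equal_matching_question_generate := by
  intro n hdom hpre
  unfold Spec_matching_question_generate
  unfold matching_question_generate matching_question_generate_alt
  unfold Pre_matching_question_generate at hpre
  have hn : ((n.toNat : Nat) : Int) = n := by omega
  show (pvPermutations (PySem.List.slice pvIter none (some n)) n.toNat).foldl
        (fun acc p => ((pvBuildA pvIter p) |> fun io => (acc.1 ++ [io.1], acc.2 ++ [io.2])))
        ([], [])
      = ((pvPermsB (PySem.List.slice pvIter none (some n)) n).map (fun p => pvInputB pvIter p),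
         (pvPermsB (PySem.List.slice pvIter none (some n)) n).map (fun p => pvOutputB p))
  rw [← hn, permsB_eq]
  simp only [Int.toNat_natCast]
  rw [PySem.List.foldl_prod_mk (f := fun acc p => acc ++ [(pvBuildA pvIter p).1])
        (g := fun acc p => acc ++ [(pvBuildA pvIter p).2])]
  rw [PySem.List.foldl_append_singleton_eq_map, PySem.List.foldl_append_singleton_eq_map]
  simp only [List.nil_append]
  simp only [Prod.mk.injEq]
  constructor <;> · apply List.map_congr_left; intro p _; rw [build_eq]
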